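-- pv_equiv track=rewrite | github.com/nmeusling/advent-of-code-2021 | snailfish/solution.py | needs_to_explode
-- ===== SOURCE A (Python) =====
-- OPEN_BRACKET = "["
--
-- CLOSE_BRACKET = "]"
--
-- def needs_to_explode(starfish_number):
--     current_level = 0
--     for i in range(len(starfish_number)):
--         if starfish_number[i] == OPEN_BRACKET:
--             current_level += 1
--         elif starfish_number[i] == CLOSE_BRACKET:
--             current_level -= 1
--         if current_level == 5:
--             return True
--     return False
-- ===== SOURCE B (Python) =====
-- def needs_to_explode(starfish_number):
--     # Divide and conquer on the character array: each segment is summarized by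
--     # (total depth delta, maximum prefix depth); summaries combine associatively,
--     # and the whole string's max prefix depth >= 5 iff nesting reaches depth 5.
--     def scan(cs):
--         n = len(cs)
--         if n == 0:
--             return (0, 0)
--         if n == 1:
--             d = 1 if cs[0] == "[" else -1 if cs[0] == "]" else 0
--             return (d, max(d, 0))
--         mid = n // 2
--         lt, lm = scan(cs[:mid])
--         rt, rm = scan(cs[mid:])
--         return (lt + rt, max(lm, lt + rm))
--     return scan(starfish_number)[1] >= 5
-- ===== Notes on version B (the rewrite author's own statement) =====
-- stated objective: alternative
-- what changed: Replaces A's linear stateful early-exit scan (depth == 5) with a divide-and-conquer that summarizes each half as (total depth delta, max prefix depth) and combines the summaries with an associative merge, testing max prefix depth >= 5 at the end.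
import Mathlib
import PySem

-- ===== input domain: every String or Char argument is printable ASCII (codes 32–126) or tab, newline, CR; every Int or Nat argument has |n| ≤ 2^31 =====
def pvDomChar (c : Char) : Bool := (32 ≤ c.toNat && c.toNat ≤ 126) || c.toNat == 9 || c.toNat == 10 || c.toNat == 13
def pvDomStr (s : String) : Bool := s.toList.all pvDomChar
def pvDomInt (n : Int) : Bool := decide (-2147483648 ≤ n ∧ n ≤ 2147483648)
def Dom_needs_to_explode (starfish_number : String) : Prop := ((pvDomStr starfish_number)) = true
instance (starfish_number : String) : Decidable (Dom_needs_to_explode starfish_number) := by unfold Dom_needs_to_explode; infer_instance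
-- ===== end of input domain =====

-- B replaces A's linear early-exit scan with a divide-and-conquer over (total delta, max prefix depth) summaries: an alternative algorithm of the same cost.
-- ===== PORT A =====
-- literal port of A: index loop, branch on '[' / ']', early return when level == 5
def pvLoopA : List Char → Int → Bool
  | [], _ => false
  | c :: rest, level =>
    let level' : Int :=
      if c = '[' then level + 1
      else if c = ']' then level - 1
      else level
    if level' = 5 then true else pvLoopA rest level'

def needs_to_explode (starfish_number : String) : Bool :=
  pvLoopA starfish_number.toList 0

-- ===== PORT B =====
-- per-character depth delta (the conditional expression in Source B's base case)
def pvDelta (c : Char) : Int :=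
  if c = '[' then 1 else if c = ']' then -1 else 0

-- Source B's scan: segment summary (total delta, max prefix depth) by divide and conquer
def pvScan : List Char → Int × Int
  | [] => (0, 0)
  | [c] => (pvDelta c, max (pvDelta c) 0)
  | c1 :: c2 :: rest =>
    let cs := c1 :: c2 :: rest
    let mid := cs.length / 2
    let l := pvScan (cs.take mid)
    let r := pvScan (cs.drop mid)
    (l.1 + r.1, max l.2 (l.1 + r.2))
termination_by cs => cs.length
decreasing_by
  · simp [List.length_take]; omega
  · simp [List.length_drop]; omega

def needs_to_explode_alt (starfish_number : String) : Bool :=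
  (pvScan starfish_number.toList).2 ≥ 5

-- ===== PRECONDITION & SPEC =====
def Spec_needs_to_explode (starfish_number : String) (out : Bool) : Prop := out = needs_to_explode_alt starfish_number
instance (starfish_number : String) (out : Bool) : Decidable (Spec_needs_to_explode starfish_number out) := by unfold Spec_needs_to_explode; infer_instance

-- ===== CLAIM (what is proved, stated in full; the proofs are below) =====
def Claim_equal_needs_to_explode : Prop := ∀ (starfish_number : String), Dom_needs_to_explode starfish_number → Spec_needs_to_explode starfish_number (needs_to_explode starfish_number)

-- ===== LEMMAS AND PROOFS =====
-- reference semantics: total delta and max running depth over prefixes (incl. empty)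
def pvTotal : List Char → Int
  | [] => 0
  | c :: cs => pvDelta c + pvTotal cs

def pvMaxPref : List Char → Int
  | [] => 0
  | c :: cs => max 0 (pvDelta c + pvMaxPref cs)

theorem pvMaxPref_nonneg (cs : List Char) : 0 ≤ pvMaxPref cs := by
  cases cs <;> simp [pvMaxPref]

theorem pvTotal_append (l r : List Char) : pvTotal (l ++ r) = pvTotal l + pvTotal r := by
  induction l with
  | nil => simp [pvTotal]
  | cons c cs ih => simp [pvTotal, ih]; ring

theorem pvMaxPref_append (l r : List Char) :
    pvMaxPref (l ++ r) = max (pvMaxPref l) (pvTotal l + pvMaxPref r) := by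
  induction l with
  | nil => simp [pvMaxPref, pvTotal]; exact pvMaxPref_nonneg r
  | cons c cs ih =>
    simp only [List.cons_append, pvMaxPref, pvTotal, ih]
    omega

-- the divide-and-conquer computes exactly (total, max prefix depth)
theorem pvScan_eq (cs : List Char) : pvScan cs = (pvTotal cs, pvMaxPref cs) := by
  induction cs using pvScan.induct with
  | case1 => simp [pvScan, pvTotal, pvMaxPref]
  | case2 c => simp [pvScan, pvTotal, pvMaxPref]; omega
  | case3 c1 c2 rest cs mid ihl ihr =>
    rw [pvScan, ihl, ihr]
    have h := List.take_append_drop ((c1 :: c2 :: rest).length / 2) (c1 :: c2 :: rest)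
    rw [show pvTotal (c1 :: c2 :: rest) = pvTotal (_ ++ _) from by rw [h],
        show pvMaxPref (c1 :: c2 :: rest) = pvMaxPref (_ ++ _) from by rw [h],
        pvTotal_append, pvMaxPref_append]

-- A's early-exit loop, started at any level ≤ 4, decides "level + max prefix depth ≥ 5"
theorem pvLoopA_eq (cs : List Char) :
    ∀ level : Int, level ≤ 4 →
      pvLoopA cs level = decide (5 ≤ level + pvMaxPref cs) := by
  induction cs with
  | nil => intro level h; simp [pvLoopA, pvMaxPref]; omega
  | cons c rest ih =>
    intro level h
    have hd : pvDelta c ≤ 1 := by simp only [pvDelta]; split_ifs <;> omega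
    have hstep : (if c = '[' then level + 1 else if c = ']' then level - 1 else level)
        = level + pvDelta c := by simp only [pvDelta]; split_ifs <;> omega
    simp only [pvLoopA, hstep, pvMaxPref]
    by_cases h5 : level + pvDelta c = 5
    · have := pvMaxPref_nonneg rest
      simp only [h5]
      have : (5:Int) ≤ level + max 0 (pvDelta c + pvMaxPref rest) := by omega
      simp [this]
    · rw [if_neg h5, ih (level + pvDelta c) (by omega)]
      have := pvMaxPref_nonneg rest
      congr 1
      simp only [eq_iff_iff]
      omega

-- ===== VERDICT (by name: the statement is the Claim_ definition above) =====
theorem needs_to_explode_spec : Claim_equal_needs_to_explode := by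
  intro s _
  unfold Spec_needs_to_explode needs_to_explode needs_to_explode_alt
  rw [pvScan_eq, pvLoopA_eq s.toList 0 (by omega)]
  simp
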